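-- pv_equiv track=rewrite | github.com/pypi-data/pypi-mirror-379 | packages/mcp-ambari-api/mcp_ambari_api-3.1.3.tar.gz/mcp_ambari_api-3.1.3/src/mcp_ambari_api/metrics_catalog.py | canonicalize_app_id
-- ===== SOURCE A (Python) =====
-- from typing import Dict, Iterable, List, Optional, Tuple
--
-- APP_SYNONYMS: Dict[str, Tuple[str, ...]] = {
--     "HOST": ("host", "hardware", "system"),
--     "ambari_server": ("ambari", "server", "ambari_server"),
--     "namenode": ("namenode", "hdfs", "nn", "name node"),
--     "datanode": ("datanode", "dn", "data node"),
--     "nodemanager": ("nodemanager", "nm", "node manager"),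
--     "resourcemanager": ("resourcemanager", "rm", "resource manager", "yarn"),
-- }
--
-- def canonicalize_app_id(app_id: Optional[str]) -> Optional[str]:
--     """Return the canonical AMS appId (case-insensitive synonym support)."""
--
--     if not app_id:
--         return None
--
--     normalized = app_id.strip()
--     if not normalized:
--         return None
--
--     lowered = normalized.lower()
--
--     for canonical, synonyms in APP_SYNONYMS.items():
--         if lowered == canonical.lower():
--             return canonical
--         for synonym in synonyms:
--             if lowered == synonym.lower():
--                 return canonical
--
--     # Default: return lowercase version if unknown (avoids None -> breakage)
--     return lowered
-- ===== SOURCE B (Python) =====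
-- from typing import Dict, Optional, Tuple
--
-- APP_SYNONYMS: Dict[str, Tuple[str, ...]] = {
--     "HOST": ("host", "hardware", "system"),
--     "ambari_server": ("ambari", "server", "ambari_server"),
--     "namenode": ("namenode", "hdfs", "nn", "name node"),
--     "datanode": ("datanode", "dn", "data node"),
--     "nodemanager": ("nodemanager", "nm", "node manager"),
--     "resourcemanager": ("resourcemanager", "rm", "resource manager", "yarn"),
-- }
--
-- # Reverse index built once: lowercased canonical/synonym -> canonical.
-- # setdefault keeps the first mapping, matching the original first-match scan.
-- _REVERSE: Dict[str, str] = {}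
-- for _canonical, _synonyms in APP_SYNONYMS.items():
--     _REVERSE.setdefault(_canonical.lower(), _canonical)
--     for _synonym in _synonyms:
--         _REVERSE.setdefault(_synonym.lower(), _canonical)
--
-- def canonicalize_app_id(app_id: Optional[str]) -> Optional[str]:
--     """Return the canonical AMS appId (case-insensitive synonym support)."""
--     if not app_id:
--         return None
--     normalized = app_id.strip()
--     if not normalized:
--         return None
--     lowered = normalized.lower()
--     return _REVERSE.get(lowered, lowered)
-- ===== Notes on version B (the rewrite author's own statement) =====
-- stated objective: idiomatic
-- what changed: Replaces the per-call nested scan over APP_SYNONYMS by a module-level reverse dict (lowercased synonym/canonical -> canonical) built once, so each call is a single dict lookup with the same lowercase fallback.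
import Mathlib
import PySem

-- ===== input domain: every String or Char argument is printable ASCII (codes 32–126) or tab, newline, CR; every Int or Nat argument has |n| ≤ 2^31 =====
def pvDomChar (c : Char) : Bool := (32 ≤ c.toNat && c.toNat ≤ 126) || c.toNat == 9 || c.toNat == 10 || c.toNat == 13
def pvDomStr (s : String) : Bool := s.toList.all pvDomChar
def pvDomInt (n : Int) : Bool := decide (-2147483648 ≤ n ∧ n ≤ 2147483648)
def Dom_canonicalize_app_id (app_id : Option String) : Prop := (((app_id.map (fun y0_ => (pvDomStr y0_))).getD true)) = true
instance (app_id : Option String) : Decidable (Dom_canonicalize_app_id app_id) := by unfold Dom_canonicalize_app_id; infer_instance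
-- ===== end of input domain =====

-- B replaces A's per-call nested scan over APP_SYNONYMS by a module-level reverse dict built once, so each call is one lookup (objective: idiomatic).

-- shared module-level constant APP_SYNONYMS (insertion order of the Python dict)
def appSynonyms : List (String × List String) :=
  [("HOST", ["host", "hardware", "system"]),
   ("ambari_server", ["ambari", "server", "ambari_server"]),
   ("namenode", ["namenode", "hdfs", "nn", "name node"]),
   ("datanode", ["datanode", "dn", "data node"]),
   ("nodemanager", ["nodemanager", "nm", "node manager"]),
   ("resourcemanager", ["resourcemanager", "rm", "resource manager", "yarn"])]

-- ===== PORT A =====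
-- inner 'for synonym in synonyms: if lowered == synonym.lower(): return canonical' loop
def synMatch (lowered : String) : List String → Bool
  | [] => false
  | syn :: rest => if lowered == PySem.Str.lower syn then true else synMatch lowered rest

-- outer 'for canonical, synonyms in APP_SYNONYMS.items()' loop with early return
def findSyn (lowered : String) : List (String × List String) → Option String
  | [] => none
  | (canonical, synonyms) :: rest =>
    if lowered == PySem.Str.lower canonical then some canonical
    else if synMatch lowered synonyms then some canonical
    else findSyn lowered rest

def canonicalize_app_id (app_id : Option String) : Option String :=
  match app_id with
  | none => none
  | some s =>
    if s == "" then none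
    else
      let normalized := PySem.Str.strip s
      if normalized == "" then none
      else
        let lowered := PySem.Str.lower normalized
        match findSyn lowered appSynonyms with
        | some canonical => some canonical
        | none => some lowered

-- ===== PORT B =====
-- module-level reverse index _REVERSE built once by dict.setdefault over APP_SYNONYMS
def reverseMap : PySem.Dict String String :=
  appSynonyms.foldl
    (fun d p =>
      let d1 := PySem.Dict.setdefault d (PySem.Str.lower p.1) p.1
      p.2.foldl (fun d' syn => PySem.Dict.setdefault d' (PySem.Str.lower syn) p.1) d1)
    PySem.Dict.empty

def canonicalize_app_id_alt (app_id : Option String) : Option String :=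
  match app_id with
  | none => none
  | some s =>
    if s == "" then none
    else
      let normalized := PySem.Str.strip s
      if normalized == "" then none
      else
        let lowered := PySem.Str.lower normalized
        some (reverseMap.getD lowered lowered)

-- ===== PRECONDITION & SPEC =====
def Spec_canonicalize_app_id (app_id : Option String) (out : Option String) : Prop := out = canonicalize_app_id_alt app_id
instance (app_id : Option String) (out : Option String) : Decidable (Spec_canonicalize_app_id app_id out) := by unfold Spec_canonicalize_app_id; infer_instance

-- ===== CLAIM (what is proved, stated in full; the proofs are below) =====
def Claim_equal_canonicalize_app_id : Prop := ∀ (app_id : Option String), Dom_canonicalize_app_id app_id → Spec_canonicalize_app_id app_id (canonicalize_app_id app_id)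

-- ===== LEMMAS AND PROOFS =====

-- get? through one setdefault, as an Option.or
theorem get?_setdefault_or (d : PySem.Dict String String) (k v x : String) :
    (PySem.Dict.setdefault d k v).get? x
      = (d.get? x).or (if x == k then some v else none) := by
  by_cases h : x = k
  · subst h
    rw [PySem.Dict.get?_setdefault_self]
    cases d.get? x <;> simp
  · rw [PySem.Dict.get?_setdefault_of_ne]
    · simp [h]
    · exact h

-- get? through the inner synonym fold = the inner scan of A
theorem get?_inner_fold (c : String) (syns : List String) (d : PySem.Dict String String)
    (l : String) :
    (syns.foldl (fun d' syn => PySem.Dict.setdefault d' (PySem.Str.lower syn) c) d).get? l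
      = (d.get? l).or (if synMatch l syns then some c else none) := by
  induction syns generalizing d with
  | nil => simp [synMatch]
  | cons s rest ih =>
    rw [List.foldl_cons, ih, get?_setdefault_or, Option.or_assoc]
    by_cases h : l == PySem.Str.lower s <;> simp [synMatch, h]

-- get? through the whole build fold = A's scan findSyn
theorem get?_build (table : List (String × List String)) (d : PySem.Dict String String)
    (l : String) :
    (table.foldl
        (fun d p =>
          let d1 := PySem.Dict.setdefault d (PySem.Str.lower p.1) p.1
          p.2.foldl (fun d' syn => PySem.Dict.setdefault d' (PySem.Str.lower syn) p.1) d1)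
        d).get? l
      = (d.get? l).or (findSyn l table) := by
  induction table generalizing d with
  | nil => simp [findSyn]
  | cons p rest ih =>
    obtain ⟨c, syns⟩ := p
    rw [List.foldl_cons]
    simp only
    rw [ih, get?_inner_fold, get?_setdefault_or, Option.or_assoc, Option.or_assoc]
    by_cases h1 : l == PySem.Str.lower c
    · simp [findSyn, h1]
    · by_cases h2 : synMatch l syns <;> simp [findSyn, h1, h2]

-- A's scan over the fixed table equals B's single dict lookup, for every query string
theorem get?_reverseMap (l : String) : reverseMap.get? l = findSyn l appSynonyms := by
  rw [reverseMap, get?_build, PySem.Dict.get?_empty, Option.none_or]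

-- ===== VERDICT (by name: the statement is the Claim_ definition above) =====
theorem canonicalize_app_id_spec : Claim_equal_canonicalize_app_id := by
  intro app_id _
  unfold Spec_canonicalize_app_id
  cases app_id with
  | none => rfl
  | some s =>
    by_cases h1 : (s == "") = true
    · simp only [canonicalize_app_id, canonicalize_app_id_alt, h1, if_true]
    · by_cases h2 : (PySem.Str.strip s == "") = true
      · simp only [canonicalize_app_id, canonicalize_app_id_alt, h1, h2,
          Bool.false_eq_true, if_false, if_true]
      · simp only [canonicalize_app_id, canonicalize_app_id_alt, h1, h2,
          Bool.false_eq_true, if_false]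
        rw [PySem.Dict.getD_eq_get?_getD, get?_reverseMap]
        cases findSyn (PySem.Str.lower (PySem.Str.strip s)) appSynonyms <;>
          simp
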